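-- pv_equiv track=rewrite | github.com/rf-iasys/OEIS | OEIS_A056220.py | A056220
-- ===== SOURCE A (Python) =====
-- def A056220(n):
--     marked = []
--     current = 1
--     k = 1
--
--     while len(marked) < n:
--         k += current - 3
--         current += 4
--         marked.append(k)
--
--     return marked
-- ===== SOURCE B (Python) =====
-- def A056220(n):
--     # closed form per index: the loop of A emits a(i) = 2*i*i - 1 for i = 0..n-1
--     return [2 * i * i - 1 for i in range(n)]
-- ===== Notes on version B (the rewrite author's own statement) =====
-- stated objective: simpler
-- what changed: Replaces the while-loop maintaining two running accumulators (k, current) with a direct closed-form comprehension computing 2*i*i-1 at each index.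
import Mathlib
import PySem

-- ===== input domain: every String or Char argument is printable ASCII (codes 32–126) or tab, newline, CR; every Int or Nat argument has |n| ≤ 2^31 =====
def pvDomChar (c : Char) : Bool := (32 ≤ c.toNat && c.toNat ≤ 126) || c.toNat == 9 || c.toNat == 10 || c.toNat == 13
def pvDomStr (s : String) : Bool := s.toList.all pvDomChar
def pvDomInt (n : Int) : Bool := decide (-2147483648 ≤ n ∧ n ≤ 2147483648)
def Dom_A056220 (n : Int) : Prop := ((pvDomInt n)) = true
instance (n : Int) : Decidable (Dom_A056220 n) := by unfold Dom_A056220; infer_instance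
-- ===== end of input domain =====

-- B replaces A's while-loop with running accumulators by a closed-form map over range(n); objective: simpler.

-- ===== PORT A =====
-- while len(marked) < n: k += current - 3; current += 4; marked.append(k)
def A056220Loop (n : Int) (marked : List Int) (current : Int) (k : Int) : List Int :=
  if (marked.length : Int) < n then
    A056220Loop n (marked ++ [k + (current - 3)]) (current + 4) (k + (current - 3))
  else marked
termination_by (n - marked.length).toNat
decreasing_by simp; omega

def A056220 (n : Int) : List Int := A056220Loop n [] 1 1

-- ===== PORT B =====
def A056220_alt (n : Int) : List Int :=
  (PySem.List.pyRange 0 n 1).map (fun i => 2 * i * i - 1)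

-- ===== PRECONDITION & SPEC =====
def Spec_A056220 (n : Int) (out : List Int) : Prop := out = A056220_alt n
instance (n : Int) (out : List Int) : Decidable (Spec_A056220 n out) := by unfold Spec_A056220; infer_instance

-- ===== CLAIM (what is proved, stated in full; the proofs are below) =====
def Claim_equal_A056220 : Prop := ∀ (n : Int), Dom_A056220 n → Spec_A056220 n (A056220 n)

-- ===== LEMMAS AND PROOFS =====
lemma A056220Loop_eq (n : Int) : ∀ (t : Nat) (m : Nat) (marked : List Int),
    (n - m).toNat = t → marked.length = m →
    A056220Loop n marked (4 * m + 1) (2 * m * m - 4 * m + 1) =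
      marked ++ (PySem.List.pyRange m n 1).map (fun i => 2 * i * i - 1) := by
  intro t
  induction t with
  | zero =>
    intro m marked ht hm
    rw [A056220Loop]
    have hle : n ≤ (m : Int) := by omega
    rw [if_neg (by simpa [hm] using not_lt.mpr hle),
        PySem.List.pyRange_one_eq_nil hle]
    simp
  | succ t ih =>
    intro m marked ht hm
    have hlt : (m : Int) < n := by omega
    rw [A056220Loop, if_pos (by simpa [hm] using hlt)]
    have hstep := ih (m + 1)
      (marked ++ [2 * (m:Int) * m - 4 * m + 1 + (4 * (m:Int) + 1 - 3)])
      (by omega) (by simp [hm])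
    have harg1 : ((2 : Int) * m * m - 4 * m + 1 + (4 * m + 1 - 3)) =
        2 * (m + 1 : Nat) * (m + 1 : Nat) - 4 * (m + 1 : Nat) + 1 := by
      push_cast; ring
    have harg2 : ((4 : Int) * m + 1 + 4) = 4 * (m + 1 : Nat) + 1 := by push_cast; ring
    rw [harg1] at hstep
    rw [harg1, harg2, hstep, PySem.List.pyRange_one_cons hlt]
    simp
    ring_nf

-- ===== VERDICT (by name: the statement is the Claim_ definition above) =====
theorem A056220_spec : Claim_equal_A056220 := by
  intro n _
  unfold Spec_A056220 A056220 A056220_alt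
  have := A056220Loop_eq n (n - 0).toNat 0 [] (by simp) (by simp)
  simpa using this
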